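-- pv_equiv track=rewrite | github.com/mattblferrer/competitive-programming | 101-150/149.py | max_diags
-- ===== SOURCE A (Python) =====
-- def highest_subsequence(arr):
--     maximum_sum = 0
--     curr_sum = 0
--
--     for value in arr:
--         if curr_sum <= 0:
--             curr_sum = value
--
--         else:
--             curr_sum += value
--
--         # check if subsequence is highest for current row
--         if maximum_sum < curr_sum:
--             maximum_sum = curr_sum
--
--     return maximum_sum
--
-- def max_diags(arr, n):
--     maximum_sum = 0
--
--     for d in range(n):
--         # upper right half of grid
--         seq = highest_subsequence(arr[d:n*(n-d):n+1])
--         if seq > maximum_sum: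
--             maximum_sum = seq
--
--         # lower left half of grid
--         seq = highest_subsequence(arr[d*n:n*n:n+1])
--         if seq > maximum_sum:
--             maximum_sum = seq
--
--     return maximum_sum
-- ===== SOURCE B (Python) =====
-- def max_diags(arr, n):
--     best = 0
--     curr = {}
--     if n > 0:
--         for k in range(min(len(arr), n * n)):
--             i, j = divmod(k, n)
--             d = i - j
--             c = curr.get(d, 0)
--             c = arr[k] if c <= 0 else c + arr[k]
--             curr[d] = c
--             if c > best:
--                 best = c
--     return best
-- ===== Notes on version B (the rewrite author's own statement) =====
-- stated objective: alternative
-- what changed: A slices each diagonal out of the flat array (two slices per d in range(n)) and runs Kadane on each slice via a helper; B makes one linear sweep over the flattened indices, maintaining a dictionary of per-diagonal running Kadane sums and a global maximum, so the slice-then-scan nested structure disappears.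
import Mathlib
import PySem

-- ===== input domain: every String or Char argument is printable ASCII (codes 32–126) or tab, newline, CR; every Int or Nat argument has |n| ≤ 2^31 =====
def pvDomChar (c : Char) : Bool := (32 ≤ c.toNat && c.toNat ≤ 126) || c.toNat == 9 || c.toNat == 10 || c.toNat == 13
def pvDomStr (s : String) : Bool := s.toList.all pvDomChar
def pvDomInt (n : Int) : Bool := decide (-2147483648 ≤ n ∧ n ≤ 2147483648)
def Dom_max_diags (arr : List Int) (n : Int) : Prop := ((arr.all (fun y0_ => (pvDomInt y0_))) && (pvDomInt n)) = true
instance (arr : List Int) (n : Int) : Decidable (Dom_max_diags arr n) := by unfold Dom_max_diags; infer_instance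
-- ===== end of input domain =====

-- B replaces A's per-diagonal slice-and-scan by ONE sweep over the flattened indices that keeps a
-- dictionary of per-diagonal running Kadane sums (objective: alternative decomposition, same cost class).

-- ===== PORT A =====
def highest_subsequence (arr : List Int) : Int :=
  (arr.foldl (fun (s : Int × Int) v =>
      let cs := if s.2 ≤ 0 then v else s.2 + v
      (if s.1 < cs then cs else s.1, cs)) (0, 0)).1

def max_diags (arr : List Int) (n : Int) : Int :=
  (PySem.List.pyRange 0 n 1).foldl (fun m d =>
    -- upper right half of grid: arr[d : n*(n-d) : n+1]
    let s1 := highest_subsequence ((PySem.List.slice? arr (some d) (some (n * (n - d))) (n + 1)).getD [])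
    let m1 := if s1 > m then s1 else m
    -- lower left half of grid: arr[d*n : n*n : n+1]
    let s2 := highest_subsequence ((PySem.List.slice? arr (some (d * n)) (some (n * n)) (n + 1)).getD [])
    if s2 > m1 then s2 else m1) 0

-- ===== PORT B =====
def max_diags_alt (arr : List Int) (n : Int) : Int :=
  if n ≤ 0 then 0
  else
    ((PySem.List.pyRange 0 (min (arr.length : Int) (n * n)) 1).foldl
      (fun (st : PySem.Dict Int Int × Int) k =>
        let d := PySem.Int.floordiv k n - PySem.Int.mod k n
        let c0 := st.1.getD d 0
        let c := if c0 ≤ 0 then PySem.List.pyGetD arr k 0 else c0 + PySem.List.pyGetD arr k 0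
        (st.1.insert d c, if c > st.2 then c else st.2))
      (PySem.Dict.empty, 0)).2

-- ===== PRECONDITION & SPEC =====
def Spec_max_diags (arr : List Int) (n : Int) (out : Int) : Prop := out = max_diags_alt arr n
instance (arr : List Int) (n : Int) (out : Int) : Decidable (Spec_max_diags arr n out) := by unfold Spec_max_diags; infer_instance

-- ===== CLAIM (what is proved, stated in full; the proofs are below) =====
def Claim_equal_max_diags : Prop := ∀ (arr : List Int) (n : Int), Dom_max_diags arr n → Spec_max_diags arr n (max_diags arr n)

-- ===== LEMMAS AND PROOFS =====

-- the Kadane step shared by both programs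
def kstep (c v : Int) : Int := if c ≤ 0 then v else c + v

-- running Kadane sums of one sequence, started at c
def kcurrs : Int → List Int → List Int
  | _, [] => []
  | c, v :: xs => kstep c v :: kcurrs (kstep c v) xs

-- running sums produced by B's sweep over (diagonal, value) pairs
def currs : PySem.Dict Int Int → List (Int × Int) → List Int
  | _, [] => []
  | s, (d, v) :: L => kstep (s.getD d 0) v :: currs (s.insert d (kstep (s.getD d 0) v)) L

-- values of the pairs with key d, in order
def vals (d : Int) (L : List (Int × Int)) : List Int :=
  L.filterMap (fun p => if p.1 = d then some p.2 else none)

-- diagonal id of flattened index k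
def keyf (n k : Int) : Int := PySem.Int.floordiv k n - PySem.Int.mod k n

-- the (diagonal, value) pair stream B sweeps over
def pairsOf (arr : List Int) (n : Int) : List (Int × Int) :=
  (PySem.List.pyRange 0 (min (arr.length : Int) (n * n)) 1).map
    (fun k => (keyf n k, PySem.List.pyGetD arr k 0))

lemma hs_aux (xs : List Int) : ∀ m c : Int,
    (xs.foldl (fun (s : Int × Int) v =>
      let cs := if s.2 ≤ 0 then v else s.2 + v
      (if s.1 < cs then cs else s.1, cs)) (m, c)).1 = (kcurrs c xs).foldl max m := by
  induction xs with
  | nil => intro m c; rfl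
  | cons v xs ih =>
      intro m c
      simp only [List.foldl_cons, kcurrs]
      rw [ih]
      have h : (if m < kstep c v then kstep c v else m) = max m (kstep c v) := by
        split_ifs <;> omega
      simp only [kstep] at h ⊢
      rw [h]

lemma hs_eq (xs : List Int) : highest_subsequence xs = (kcurrs 0 xs).foldl max 0 := by
  unfold highest_subsequence; exact hs_aux xs 0 0

lemma sweep_eq (L : List (Int × Int)) : ∀ (s : PySem.Dict Int Int) (b : Int),
    (L.foldl (fun (st : PySem.Dict Int Int × Int) p =>
      let c := kstep (st.1.getD p.1 0) p.2
      (st.1.insert p.1 c, if c > st.2 then c else st.2)) (s, b)).2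
    = (currs s L).foldl max b := by
  induction L with
  | nil => intro s b; rfl
  | cons p L ih =>
      intro s b
      obtain ⟨d, v⟩ := p
      simp only [List.foldl_cons, currs]
      rw [ih]
      have h : (if kstep (s.getD d 0) v > b then kstep (s.getD d 0) v else b)
           = max b (kstep (s.getD d 0) v) := by split_ifs <;> omega
      rw [h]

lemma flatMap_congr' {α β : Type} (D : List α) (f g : α → List β)
    (h : ∀ d ∈ D, f d = g d) : D.flatMap f = D.flatMap g := by
  induction D with
  | nil => rfl
  | cons d D ih =>
      simp only [List.flatMap_cons]
      rw [h d (by simp), ih (fun x hx => h x (by simp [hx]))]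

lemma bucket_perm (L : List (Int × Int)) : ∀ (D : List Int) (s : PySem.Dict Int Int),
    D.Nodup → (∀ p ∈ L, p.1 ∈ D) →
    (currs s L).Perm (D.flatMap (fun d => kcurrs (s.getD d 0) (vals d L))) := by
  induction L with
  | nil =>
      intro D s _ _
      have h : D.flatMap (fun d => kcurrs (s.getD d 0) (vals d [])) = D.flatMap (fun _ => []) :=
        flatMap_congr' _ _ _ (fun d _ => rfl)
      rw [h]
      simp [currs]
  | cons p L ih =>
      intro D s hnd hmem
      obtain ⟨d, v⟩ := p
      have hd : d ∈ D := hmem (d, v) (by simp)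
      obtain ⟨D₁, D₂, rfl⟩ := List.append_of_mem hd
      have h1 : d ∉ D₁ := by
        intro hmem1
        have h := List.Nodup.sublist (by simp : (D₁ ++ [d]).Sublist (D₁ ++ d :: D₂)) hnd
        simp [List.nodup_append] at h
        exact h.2 d hmem1 rfl
      have h2 : d ∉ D₂ := by
        have h := List.Nodup.sublist (by simp : (d :: D₂).Sublist (D₁ ++ d :: D₂)) hnd
        simp [List.nodup_cons] at h
        exact h.1
      set c := kstep (s.getD d 0) v with hc
      have hvd : vals d ((d, v) :: L) = v :: vals d L := by simp [vals]
      have hvne : ∀ d' : Int, d' ≠ d → vals d' ((d, v) :: L) = vals d' L := by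
        intro d' hne
        simp only [vals, List.filterMap_cons]
        rw [if_neg (by omega : ¬ d = d')]
      have hins_self : (s.insert d c).getD d 0 = c := by
        rw [PySem.Dict.getD_insert]; simp
      have hins_ne : ∀ d' : Int, d' ≠ d → (s.insert d c).getD d' 0 = s.getD d' 0 := by
        intro d' hne; rw [PySem.Dict.getD_insert]; simp [hne]
      have hF1 : D₁.flatMap (fun d' => kcurrs (s.getD d' 0) (vals d' ((d, v) :: L)))
               = D₁.flatMap (fun d' => kcurrs ((s.insert d c).getD d' 0) (vals d' L)) := by
        apply flatMap_congr'
        intro d' hd'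
        have hne : d' ≠ d := fun h => h1 (h ▸ hd')
        rw [hvne d' hne, hins_ne d' hne]
      have hF2 : D₂.flatMap (fun d' => kcurrs (s.getD d' 0) (vals d' ((d, v) :: L)))
               = D₂.flatMap (fun d' => kcurrs ((s.insert d c).getD d' 0) (vals d' L)) := by
        apply flatMap_congr'
        intro d' hd'
        have hne : d' ≠ d := fun h => h2 (h ▸ hd')
        rw [hvne d' hne, hins_ne d' hne]
      have hfd : kcurrs (s.getD d 0) (vals d ((d, v) :: L))
               = c :: kcurrs ((s.insert d c).getD d 0) (vals d L) := by
        rw [hvd, hins_self]; rfl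
      have hcurrs : currs s ((d, v) :: L) = c :: currs (s.insert d c) L := rfl
      rw [hcurrs]
      simp only [List.flatMap_append, List.flatMap_cons, hF1, hF2, hfd]
      have hih := ih (D₁ ++ d :: D₂) (s.insert d c) hnd
        (fun p hp => hmem p (by simp [hp]))
      simp only [List.flatMap_append, List.flatMap_cons] at hih
      refine (hih.cons c).trans ?_
      simp only [List.cons_append]
      exact (List.perm_middle (a := c)
        (l₁ := D₁.flatMap (fun d' => kcurrs ((s.insert d c).getD d' 0) (vals d' L)))
        (l₂ := kcurrs ((s.insert d c).getD d 0) (vals d L) ++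
               D₂.flatMap (fun d' => kcurrs ((s.insert d c).getD d' 0) (vals d' L)))).symm

lemma foldl_max_nonneg (xs : List Int) : 0 ≤ xs.foldl max 0 :=
  (PySem.List.le_foldl_max xs 0).1

lemma foldl_max_shift (xs : List Int) : ∀ b : Int, 0 ≤ b →
    xs.foldl max b = max b (xs.foldl max 0) := by
  induction xs with
  | nil => intro b _; simp; omega
  | cons x xs ih =>
      intro b hb
      simp only [List.foldl_cons]
      rw [ih (max b x) (by omega), ih (max 0 x) (by omega)]
      omega

lemma foldl_max_flatMap (D : List Int) (g : Int → List Int) :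
    (D.flatMap g).foldl max 0 = (D.map (fun d => (g d).foldl max 0)).foldl max 0 := by
  induction D with
  | nil => rfl
  | cons d D ih =>
      simp only [List.flatMap_cons, List.map_cons, List.foldl_cons, List.foldl_append]
      rw [foldl_max_shift _ _ (foldl_max_nonneg (g d)), ih,
          foldl_max_shift _ _ (le_max_of_le_right (foldl_max_nonneg (g d)))]
      have := foldl_max_nonneg (g d)
      omega

lemma foldl_max_le (l : List Int) : ∀ b c : Int, b ≤ c → (∀ x ∈ l, x ≤ c) → l.foldl max b ≤ c := by
  induction l with
  | nil => intro b c hb _; simpa using hb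
  | cons x l ih =>
      intro b c hb hx
      simp only [List.foldl_cons]
      exact ih _ _ (by have := hx x (by simp); omega) (fun y hy => hx y (by simp [hy]))

lemma pairwise_lt_pyRange_pos (a b st : Int) (hst : 0 < st) :
    (PySem.List.pyRange a b st).Pairwise (· < ·) := by
  rw [PySem.List.pyRange_of_pos a b hst]
  refine List.Pairwise.map _ ?_ List.pairwise_lt_range
  intro i j hij
  have : (i : Int) < (j : Int) := by exact_mod_cast hij
  nlinarith

lemma eq_of_mem_iff_lt (l₁ l₂ : List Int) (h₁ : l₁.Pairwise (· < ·))
    (h₂ : l₂.Pairwise (· < ·)) (h : ∀ x, x ∈ l₁ ↔ x ∈ l₂) : l₁ = l₂ :=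
  List.Perm.eq_of_pairwise (fun a b _ _ hab hba => by omega) h₁ h₂
    ((List.perm_ext_iff_of_nodup (h₁.imp ne_of_lt) (h₂.imp ne_of_lt)).mpr h)

lemma keyf_eq (n k : Int) (hn : 0 < n) : keyf n k = k / n - k % n := by
  rw [keyf, PySem.Int.floordiv_eq_ediv_of_pos hn, PySem.Int.mod_eq_emod_of_pos hn]

lemma slice_char (xs : List Int) (a b st : Int) (ha : 0 ≤ a) (hb : 0 ≤ b) (hst : 0 < st) :
    (PySem.List.slice? xs (some a) (some b) st).getD [] =
    (PySem.List.pyRange (min a (xs.length : Int)) (min b (xs.length : Int)) st).map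
      (fun k => PySem.List.pyGetD xs k 0) := by
  have hlen : (0:Int) ≤ (xs.length : Int) := by positivity
  rw [PySem.List.pyRange_of_pos _ _ hst, List.map_map]
  simp only [PySem.List.slice?, PySem.List.sliceIndices, if_neg (by omega : ¬ st = 0),
    if_neg (by omega : ¬ st < 0), if_neg (by omega : ¬ a < 0), if_neg (by omega : ¬ b < 0)]
  simp only [Option.getD_some]
  set s0 := min a (xs.length : Int) with hs0
  set e0 := min b (xs.length : Int) with he0
  have hs0n : 0 ≤ s0 := by omega
  have he0l : e0 ≤ (xs.length : Int) := by omega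
  rw [← List.filterMap_eq_map, if_pos hst]
  apply List.filterMap_congr
  intro k hk
  simp only [List.mem_range] at hk
  split_ifs at hk with hlt
  · have hk' : (k : Int) < (e0 - s0 + st - 1) / st := by
      rwa [← Int.lt_toNat]
    have hle : ((k : Int) + 1) * st ≤ e0 - s0 + st - 1 := by
      rw [← Int.le_ediv_iff_mul_le hst]; omega
    have hbound : s0 + st * (k : Int) < e0 := by nlinarith
    have hnn : 0 ≤ s0 + st * (k : Int) := by positivity
    have hlt2 : (s0 + st * (k : Int)).toNat < xs.length := by omega
    rw [List.getElem?_eq_getElem hlt2]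
    simp only [Function.comp_apply]
    rw [PySem.List.pyGetD_of_nonneg xs 0 hnn, List.getD_eq_getElem xs 0 hlt2]
  · omega

lemma filter_key_lower (arr : List Int) (n d : Int) (hn : 0 < n) (hd0 : 0 ≤ d) (hdn : d < n) :
    ((PySem.List.pyRange 0 (min (arr.length : Int) (n * n)) 1).filter
        (fun k => decide (keyf n k = d)))
    = PySem.List.pyRange (min (d * n) (arr.length : Int)) (min (n * n) (arr.length : Int)) (n + 1) := by
  apply eq_of_mem_iff_lt
  · exact (PySem.List.pairwise_lt_pyRange_one 0 _).filter _
  · exact pairwise_lt_pyRange_pos _ _ _ (by omega)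
  intro x
  rw [List.mem_filter, PySem.List.mem_pyRange_one,
      PySem.List.mem_pyRange_iff_of_pos (by omega : (0:Int) < n + 1),
      decide_eq_true_eq, keyf_eq n x hn]
  constructor
  · rintro ⟨⟨h0x, hxM⟩, hkey⟩
    have hj0 : 0 ≤ x % n := Int.emod_nonneg x (by omega)
    have hjn : x % n < n := Int.emod_lt_of_pos x hn
    have h1 : x = n * (x / n) + x % n := (Int.ediv_add_emod x n).symm
    have hd' : d = x / n - x % n := by omega
    have hmain : x - d * n = (x % n) * (n + 1) := by rw [hd']; linear_combination h1
    have hge : d * n ≤ x := by nlinarith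
    have hmin : min (d * n) (arr.length : Int) = d * n := by omega
    refine ⟨by omega, by omega, ⟨x % n, ?_⟩⟩
    rw [hmin]; linear_combination hmain
  · rintro ⟨hs, hxe, t, ht⟩
    by_cases hc : d * n ≤ (arr.length : Int)
    · rw [min_eq_left hc] at hs ht
      have hdn0 : 0 ≤ d * n := mul_nonneg hd0 (by omega)
      have hxnn : x < n * n := by omega
      have ht0 : 0 ≤ t := by
        by_contra hcon
        have h2 : t ≤ -1 := by omega
        have := mul_le_mul_of_nonneg_left h2 (show (0:Int) ≤ n + 1 by omega)
        nlinarith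
      have htn : t < n - d := by
        by_contra hcon
        have h2 : n - d ≤ t := by omega
        have := mul_le_mul_of_nonneg_left h2 (show (0:Int) ≤ n + 1 by omega)
        nlinarith
      have hx : x = t + (d + t) * n := by linear_combination ht
      have hdiv : x / n = d + t := by
        rw [hx, Int.add_mul_ediv_right _ _ (by omega : n ≠ 0),
            Int.ediv_eq_zero_of_lt ht0 (by omega)]
        omega
      have hmod : x % n = t := by
        rw [hx, Int.add_mul_emod_self_right, Int.emod_eq_of_lt ht0 (by omega)]
      exact ⟨⟨by omega, by omega⟩, by omega⟩
    · exfalso; omega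

lemma filter_key_upper (arr : List Int) (n d : Int) (hn : 0 < n) (hd0 : 0 ≤ d) (hdn : d < n) :
    ((PySem.List.pyRange 0 (min (arr.length : Int) (n * n)) 1).filter
        (fun k => decide (keyf n k = -d)))
    = PySem.List.pyRange (min d (arr.length : Int)) (min (n * (n - d)) (arr.length : Int)) (n + 1) := by
  apply eq_of_mem_iff_lt
  · exact (PySem.List.pairwise_lt_pyRange_one 0 _).filter _
  · exact pairwise_lt_pyRange_pos _ _ _ (by omega)
  intro x
  rw [List.mem_filter, PySem.List.mem_pyRange_one,
      PySem.List.mem_pyRange_iff_of_pos (by omega : (0:Int) < n + 1),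
      decide_eq_true_eq, keyf_eq n x hn]
  constructor
  · rintro ⟨⟨h0x, hxM⟩, hkey⟩
    have hj0 : 0 ≤ x % n := Int.emod_nonneg x (by omega)
    have hjn : x % n < n := Int.emod_lt_of_pos x hn
    have hi0 : 0 ≤ x / n := Int.ediv_nonneg h0x (by omega)
    have h1 : x = n * (x / n) + x % n := (Int.ediv_add_emod x n).symm
    have hjd : x % n = x / n + d := by omega
    have hmain : x - d = (x / n) * (n + 1) := by
      rw [(by omega : d = x % n - x / n)]; linear_combination h1
    have hge : d ≤ x := by nlinarith
    have hiub : x / n ≤ n - d - 1 := by omega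
    have hxub : x < n * (n - d) := by
      have := mul_le_mul_of_nonneg_left hiub (show (0:Int) ≤ n + 1 by omega)
      nlinarith
    have hmin : min d (arr.length : Int) = d := by omega
    refine ⟨by omega, by omega, ⟨x / n, ?_⟩⟩
    rw [hmin]; linear_combination hmain
  · rintro ⟨hs, hxe, t, ht⟩
    by_cases hc : d ≤ (arr.length : Int)
    · rw [min_eq_left hc] at hs ht
      have ht0 : 0 ≤ t := by
        by_contra hcon
        have h2 : t ≤ -1 := by omega
        have := mul_le_mul_of_nonneg_left h2 (show (0:Int) ≤ n + 1 by omega)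
        nlinarith
      have hxub : x < n * (n - d) := by omega
      have htn : t < n - d := by
        by_contra hcon
        have h2 : n - d ≤ t := by omega
        have := mul_le_mul_of_nonneg_left h2 (show (0:Int) ≤ n + 1 by omega)
        nlinarith
      have hx : x = (t + d) + t * n := by linear_combination ht
      have hdiv : x / n = t := by
        rw [hx, Int.add_mul_ediv_right _ _ (by omega : n ≠ 0),
            Int.ediv_eq_zero_of_lt (by omega) (by omega)]
        omega
      have hmod : x % n = t + d := by
        rw [hx, Int.add_mul_emod_self_right, Int.emod_eq_of_lt (by omega) (by omega)]
      have hxnn : x < n * n := by nlinarith [mul_nonneg (show (0:Int) ≤ n by omega) hd0]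
      exact ⟨⟨by omega, by omega⟩, by omega⟩
    · exfalso; omega

lemma vals_map (d : Int) (ks : List Int) (f g : Int → Int) :
    vals d (ks.map (fun k => (f k, g k))) = (ks.filter (fun k => decide (f k = d))).map g := by
  induction ks with
  | nil => rfl
  | cons k ks ih =>
      simp only [List.map_cons, vals, List.filterMap_cons, List.filter_cons]
      by_cases h : f k = d
      · simp only [h, decide_true]
        simpa [vals] using congrArg (g k :: ·) (by simpa [vals] using ih)
      · simp only [decide_eq_true_eq, h, if_false]
        simpa [vals] using ih

lemma key_mem_D (arr : List Int) (n k : Int) (hn : 0 < n) (h0 : 0 ≤ k)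
    (hk : k < min (arr.length : Int) (n * n)) :
    keyf n k ∈ PySem.List.pyRange (1 - n) n 1 := by
  rw [PySem.List.mem_pyRange_one, keyf_eq n k hn]
  have hj0 : 0 ≤ k % n := Int.emod_nonneg k (by omega)
  have hjn : k % n < n := Int.emod_lt_of_pos k hn
  have hi0 : 0 ≤ k / n := Int.ediv_nonneg h0 (by omega)
  have hin : k / n < n := by
    rw [Int.ediv_lt_iff_lt_mul hn]; omega
  omega

lemma B_char (arr : List Int) (n : Int) (hn : 0 < n) :
    max_diags_alt arr n =
    ((PySem.List.pyRange (1 - n) n 1).map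
      (fun d => highest_subsequence (vals d (pairsOf arr n)))).foldl max 0 := by
  have hstep : max_diags_alt arr n = (currs PySem.Dict.empty (pairsOf arr n)).foldl max 0 := by
    unfold max_diags_alt
    rw [if_neg (by omega : ¬ n ≤ 0), ← sweep_eq]
    unfold pairsOf
    rw [List.foldl_map]
    rfl
  rw [hstep]
  have hperm := bucket_perm (pairsOf arr n) (PySem.List.pyRange (1 - n) n 1) PySem.Dict.empty
      (PySem.List.nodup_pyRange_one _ _)
      (by
        intro p hp
        unfold pairsOf at hp
        simp only [List.mem_map] at hp
        obtain ⟨k, hk, rfl⟩ := hp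
        rw [PySem.List.mem_pyRange_one] at hk
        exact key_mem_D arr n k hn hk.1 hk.2)
  rw [hperm.foldl_eq 0]
  rw [flatMap_congr' _ _ (fun d => kcurrs 0 (vals d (pairsOf arr n)))
      (fun d _ => by rw [PySem.Dict.getD_empty])]
  rw [foldl_max_flatMap]
  congr 1
  apply List.map_congr_left
  intro d _
  rw [hs_eq]

lemma A_char (arr : List Int) (n : Int) (hn : 0 < n) :
    max_diags arr n =
    ((PySem.List.pyRange 0 n 1).map
      (fun d => max (highest_subsequence (vals (-d) (pairsOf arr n)))
                    (highest_subsequence (vals d (pairsOf arr n))))).foldl max 0 := by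
  unfold max_diags
  rw [List.foldl_map]
  apply PySem.List.foldl_congr_mem
  intro acc d hd
  rw [PySem.List.mem_pyRange_one] at hd
  have e1 : (PySem.List.slice? arr (some d) (some (n * (n - d))) (n + 1)).getD []
      = vals (-d) (pairsOf arr n) := by
    unfold pairsOf
    rw [vals_map (-d) _ (keyf n) (fun k => PySem.List.pyGetD arr k 0),
        filter_key_upper arr n d hn hd.1 hd.2,
        slice_char arr d (n * (n - d)) (n + 1) hd.1 (by nlinarith) (by omega)]
  have e2 : (PySem.List.slice? arr (some (d * n)) (some (n * n)) (n + 1)).getD []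
      = vals d (pairsOf arr n) := by
    unfold pairsOf
    rw [vals_map d _ (keyf n) (fun k => PySem.List.pyGetD arr k 0),
        filter_key_lower arr n d hn hd.1 hd.2,
        slice_char arr (d * n) (n * n) (n + 1) (by nlinarith) (by positivity) (by omega)]
  simp only [e1, e2]
  split_ifs <;> omega

-- ===== VERDICT (by name: the statement is the Claim_ definition above) =====
theorem max_diags_spec : Claim_equal_max_diags := by
  intro arr n _
  unfold Spec_max_diags
  by_cases hn : 0 < n
  · rw [A_char arr n hn, B_char arr n hn]
    apply le_antisymm
    · apply foldl_max_le _ _ _ (foldl_max_nonneg _)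
      intro x hx
      simp only [List.mem_map] at hx
      obtain ⟨d, hd, rfl⟩ := hx
      rw [PySem.List.mem_pyRange_one] at hd
      have h1 : highest_subsequence (vals (-d) (pairsOf arr n)) ≤ _ :=
        (PySem.List.le_foldl_max (((PySem.List.pyRange (1 - n) n 1).map
          (fun d => highest_subsequence (vals d (pairsOf arr n)))) ) 0).2 _
          (List.mem_map_of_mem (by rw [PySem.List.mem_pyRange_one]; omega))
      have h2 : highest_subsequence (vals d (pairsOf arr n)) ≤ _ :=
        (PySem.List.le_foldl_max (((PySem.List.pyRange (1 - n) n 1).map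
          (fun d => highest_subsequence (vals d (pairsOf arr n)))) ) 0).2 _
          (List.mem_map_of_mem (by rw [PySem.List.mem_pyRange_one]; omega))
      omega
    · apply foldl_max_le _ _ _ (foldl_max_nonneg _)
      intro x hx
      simp only [List.mem_map] at hx
      obtain ⟨d, hd, rfl⟩ := hx
      rw [PySem.List.mem_pyRange_one] at hd
      by_cases hd0 : 0 ≤ d
      · have h2 : max (highest_subsequence (vals (-d) (pairsOf arr n)))
                      (highest_subsequence (vals d (pairsOf arr n))) ≤ _ :=
          (PySem.List.le_foldl_max (((PySem.List.pyRange 0 n 1).map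
            (fun d => max (highest_subsequence (vals (-d) (pairsOf arr n)))
                          (highest_subsequence (vals d (pairsOf arr n))))) ) 0).2 _
            (List.mem_map_of_mem (by rw [PySem.List.mem_pyRange_one]; omega))
        omega
      · have h2 : max (highest_subsequence (vals (-(-d)) (pairsOf arr n)))
                      (highest_subsequence (vals (-d) (pairsOf arr n))) ≤ _ :=
          (PySem.List.le_foldl_max (((PySem.List.pyRange 0 n 1).map
            (fun d => max (highest_subsequence (vals (-d) (pairsOf arr n)))
                          (highest_subsequence (vals d (pairsOf arr n))))) ) 0).2 _
            (List.mem_map_of_mem (by rw [PySem.List.mem_pyRange_one]; omega))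
        simp only [neg_neg] at h2
        omega
  · unfold max_diags max_diags_alt
    rw [PySem.List.pyRange_one_eq_nil (by omega), if_pos (by omega)]
    rfl
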